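-- pv_equiv track=rewrite | github.com/venkatas/vikramaditya | prioritize.py | _replace_cve_message
-- ===== SOURCE A (Python) =====
-- def dedupe_keep_order(items):
--     seen = set()
--     ordered = []
--     for item in items:
--         if not item or item in seen:
--             continue
--         seen.add(item)
--         ordered.append(item)
--     return ordered
--
-- def _replace_cve_message(cves: list[str], prefixes: tuple[str, ...], replacement: str) -> list[str]:
--     filtered = []
--     lowered_prefixes = tuple(prefix.lower() for prefix in prefixes)
--     for cve in cves:
--         if cve.lower().startswith(lowered_prefixes):
--             continue
--         filtered.append(cve)
--     filtered.append(replacement)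
--     return dedupe_keep_order(filtered)
-- ===== SOURCE B (Python) =====
-- def _replace_cve_message(cves: list[str], prefixes: tuple[str, ...], replacement: str) -> list[str]:
--     lowered = tuple(p.lower() for p in prefixes)
--     seen = set()
--     result = []
--     for cve in cves:
--         if not cve or cve in seen or cve.lower().startswith(lowered):
--             continue
--         seen.add(cve)
--         result.append(cve)
--     if replacement and replacement not in seen:
--         result.append(replacement)
--     return result
-- ===== Notes on version B (the rewrite author's own statement) =====
-- stated objective: simpler
-- what changed: A does a filter pass over cves, appends the replacement, then runs a separate dedupe pass over that intermediate list; B makes one fused pass over cves maintaining (seen, result) that skips empty, duplicate or prefixed entries, then guards the replacement append once, so the intermediate list and the dedupe helper disappear.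
import Mathlib
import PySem

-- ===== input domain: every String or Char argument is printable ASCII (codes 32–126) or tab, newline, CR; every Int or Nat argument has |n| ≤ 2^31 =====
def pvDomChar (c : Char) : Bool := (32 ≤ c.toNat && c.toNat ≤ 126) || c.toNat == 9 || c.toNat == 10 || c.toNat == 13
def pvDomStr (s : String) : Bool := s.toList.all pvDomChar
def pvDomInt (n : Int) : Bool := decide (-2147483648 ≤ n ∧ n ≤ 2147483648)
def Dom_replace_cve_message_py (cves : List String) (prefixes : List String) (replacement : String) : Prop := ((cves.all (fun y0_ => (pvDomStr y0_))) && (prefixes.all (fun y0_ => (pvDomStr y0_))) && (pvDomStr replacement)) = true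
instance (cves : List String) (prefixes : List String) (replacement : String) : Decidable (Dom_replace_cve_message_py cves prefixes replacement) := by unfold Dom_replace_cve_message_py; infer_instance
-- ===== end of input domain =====

-- ===== PORT A =====
-- helper: dedupe_keep_order from the Python module (seen : set, ordered : list)
def dedupe_keep_order (items : List String) : List String :=
  (items.foldl (fun (st : PySem.Set String × List String) item =>
    if item = "" ∨ PySem.Set.contains st.1 item = true then st
    else (PySem.Set.add st.1 item, st.2 ++ [item])) (PySem.Set.empty, [])).2

-- port of A: filter pass, append replacement, then dedupe pass
def replace_cve_message_py (cves : List String) (prefixes : List String) (replacement : String) : List String :=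
  let lowered := prefixes.map PySem.Str.lower
  let filtered := cves.foldl (fun acc cve =>
    if lowered.any (fun p => PySem.Str.startswith (PySem.Str.lower cve) p) then acc
    else acc ++ [cve]) []
  dedupe_keep_order (filtered ++ [replacement])

-- ===== PORT B =====
-- one honest line: B fuses A's filter pass, append and dedupe pass into a single
-- loop over cves keeping (seen, result), then guards the replacement once (objective: simpler).
def replace_cve_message_py_alt (cves : List String) (prefixes : List String) (replacement : String) : List String :=
  let lowered := prefixes.map PySem.Str.lower
  let st := cves.foldl (fun (st : PySem.Set String × List String) cve =>
    if cve = "" ∨ PySem.Set.contains st.1 cve = true ∨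
        lowered.any (fun p => PySem.Str.startswith (PySem.Str.lower cve) p) = true
    then st
    else (PySem.Set.add st.1 cve, st.2 ++ [cve])) (PySem.Set.empty, [])
  if replacement ≠ "" ∧ ¬ PySem.Set.contains st.1 replacement = true
  then st.2 ++ [replacement] else st.2

-- ===== PRECONDITION & SPEC =====
def Spec_replace_cve_message_py (cves : List String) (prefixes : List String) (replacement : String) (out : List String) : Prop := out = replace_cve_message_py_alt cves prefixes replacement
instance (cves : List String) (prefixes : List String) (replacement : String) (out : List String) : Decidable (Spec_replace_cve_message_py cves prefixes replacement out) := by unfold Spec_replace_cve_message_py; infer_instance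

-- ===== CLAIM (what is proved, stated in full; the proofs are below) =====
def Claim_equal_replace_cve_message_py : Prop := ∀ (cves : List String) (prefixes : List String) (replacement : String), Dom_replace_cve_message_py cves prefixes replacement → Spec_replace_cve_message_py cves prefixes replacement (replace_cve_message_py cves prefixes replacement)

-- ===== LEMMAS AND PROOFS =====

-- A's filter loop builds the list filter
theorem filter_loop_eq (m : String → Bool) (cves : List String) (acc : List String) :
    cves.foldl (fun acc cve => if m cve = true then acc else acc ++ [cve]) acc
      = acc ++ cves.filter (fun cve => !m cve) := by
  induction cves generalizing acc with
  | nil => simp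
  | cons c cs ih =>
    by_cases h : m c = true <;> simp [h, ih]

-- the dedupe fold over the kept elements equals B's fused fold
theorem dedupe_filter_eq (m : String → Bool) (cves : List String)
    (st : PySem.Set String × List String) :
    (cves.filter (fun cve => !m cve)).foldl
      (fun st item => if item = "" ∨ PySem.Set.contains st.1 item = true then st
        else (PySem.Set.add st.1 item, st.2 ++ [item])) st
    = cves.foldl
      (fun st cve => if cve = "" ∨ PySem.Set.contains st.1 cve = true ∨ m cve = true then st
        else (PySem.Set.add st.1 cve, st.2 ++ [cve])) st := by
  induction cves generalizing st with
  | nil => rfl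
  | cons c cs ih =>
    by_cases hm : m c = true
    · rw [List.filter_cons_of_neg (by simp [hm]), List.foldl_cons,
        if_pos (Or.inr (Or.inr hm))]
      exact ih st
    · rw [List.filter_cons_of_pos (by simp [hm]), List.foldl_cons, List.foldl_cons]
      by_cases he : c = "" ∨ PySem.Set.contains st.1 c = true
      · rw [if_pos he, if_pos (by tauto)]
        exact ih st
      · rw [if_neg he, if_neg (by tauto)]
        exact ih _

-- ===== VERDICT (by name: the statement is the Claim_ definition above) =====
theorem replace_cve_message_py_spec : Claim_equal_replace_cve_message_py := by
  intro cves prefixes replacement _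
  unfold Spec_replace_cve_message_py replace_cve_message_py replace_cve_message_py_alt dedupe_keep_order
  simp only [List.foldl_append, List.foldl_cons, List.foldl_nil]
  rw [filter_loop_eq, List.nil_append, dedupe_filter_eq]
  set st := cves.foldl
      (fun st cve => if cve = "" ∨ PySem.Set.contains st.1 cve = true ∨
          (prefixes.map PySem.Str.lower).any (fun p => PySem.Str.startswith (PySem.Str.lower cve) p) = true then st
        else (PySem.Set.add st.1 cve, st.2 ++ [cve])) (PySem.Set.empty, []) with hst
  by_cases h : replacement = "" ∨ PySem.Set.contains st.1 replacement = true
  · rw [if_pos h, if_neg (by tauto)]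
  · rw [if_neg h, if_pos (by tauto)]
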